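-- pv_equiv track=rewrite | github.com/ravi1997/services | app/utils/email_util.py | validate_body
-- ===== SOURCE A (Python) =====
-- FORBIDDEN_TOKENS = [t.strip().upper() for t in ["<script", "SELECT", "INSERT", "DELETE", "UPDATE", "DROP", "UNION", "EXEC"]]
--
-- def validate_body(body: str) -> bool:
--     """
--     Validates email body content
--     """
--     if not isinstance(body, str) or not body.strip():
--         return False
--     if len(body.strip()) > 10000:  # Reasonable body length (10KB)
--         return False
--     # Check for forbidden content
--     body_upper = body.upper()
--     if any(token in body_upper for token in FORBIDDEN_TOKENS):
--         return False
--     return True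
-- ===== SOURCE B (Python) =====
-- # B: single forward scan with positional startswith instead of eight independent substring scans.
-- _TOKENS = ("<SCRIPT", "SELECT", "INSERT", "DELETE", "UPDATE", "DROP", "UNION", "EXEC")
--
-- def validate_body(body: str) -> bool:
--     """
--     Validates email body content
--     """
--     if not isinstance(body, str):
--         return False
--     s = body.strip()
--     if not s or len(s) > 10000:
--         return False
--     u = body.upper()
--     for i in range(len(u)):
--         for t in _TOKENS:
--             if u.startswith(t, i):
--                 return False
--     return True
-- ===== Notes on version B (the rewrite author's own statement) =====
-- stated objective: alternative
-- what changed: A tests each of the 8 forbidden tokens with its own full substring-membership scan of the uppercased body; B makes one left-to-right pass over the uppercased body and at each position checks whether any token starts there, so the body is traversed once.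
import Mathlib
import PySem

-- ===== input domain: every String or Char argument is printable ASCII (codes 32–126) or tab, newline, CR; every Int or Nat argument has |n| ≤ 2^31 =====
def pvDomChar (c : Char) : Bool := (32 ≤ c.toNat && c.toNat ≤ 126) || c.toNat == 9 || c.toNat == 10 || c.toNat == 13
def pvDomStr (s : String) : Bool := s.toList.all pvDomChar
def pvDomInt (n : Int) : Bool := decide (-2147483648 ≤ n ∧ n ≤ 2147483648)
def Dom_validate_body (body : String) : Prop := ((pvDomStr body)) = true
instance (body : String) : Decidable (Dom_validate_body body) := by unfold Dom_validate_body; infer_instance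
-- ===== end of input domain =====

-- B replaces A's eight independent substring scans by one left-to-right pass checking each position; alternative decomposition, not claimed faster.

-- ===== PORT A =====
def FORBIDDEN_TOKENS : List String :=
  (["<script", "SELECT", "INSERT", "DELETE", "UPDATE", "DROP", "UNION", "EXEC"]).map
    (fun t => PySem.Str.upper (PySem.Str.strip t))

def validate_body (body : String) : Bool :=
  -- 'not isinstance(body, str)' is always False here; 'not body.strip()' = stripped string empty
  if PySem.Str.len (PySem.Str.strip body) = 0 then false
  else if PySem.Str.len (PySem.Str.strip body) > 10000 then false
  else
    let body_upper := PySem.Str.upper body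
    if FORBIDDEN_TOKENS.any (fun token => PySem.Str.isIn token body_upper) then false
    else true

-- ===== PORT B =====
def tokensB : List String :=
  ["<SCRIPT", "SELECT", "INSERT", "DELETE", "UPDATE", "DROP", "UNION", "EXEC"]

-- the 'for i in range(len(u))' loop over positions, as recursion on the suffix at position i
def scanB : List Char → Bool
  | [] => false
  | c :: rest =>
    if tokensB.any (fun t => t.toList.isPrefixOf (c :: rest)) then true
    else scanB rest

def validate_body_alt (body : String) : Bool :=
  let s := PySem.Str.strip body
  if PySem.Str.len s = 0 ∨ PySem.Str.len s > 10000 then false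
  else
    let u := PySem.Str.upper body
    if scanB u.toList then false else true

-- ===== PRECONDITION & SPEC =====
def Spec_validate_body (body : String) (out : Bool) : Prop := out = validate_body_alt body
instance (body : String) (out : Bool) : Decidable (Spec_validate_body body out) := by unfold Spec_validate_body; infer_instance

-- ===== CLAIM (what is proved, stated in full; the proofs are below) =====
def Claim_equal_validate_body : Prop := ∀ (body : String), Dom_validate_body body → Spec_validate_body body (validate_body body)

-- ===== LEMMAS AND PROOFS =====

lemma scanB_iff (l : List Char) :
    scanB l = true ↔ ∃ t ∈ tokensB, t.toList <:+: l := by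
  induction l with
  | nil =>
    simp only [scanB]
    constructor
    · intro h; cases h
    · rintro ⟨t, ht, hinf⟩
      have : t.toList = [] := List.eq_nil_of_infix_nil hinf
      fin_cases ht <;> simp_all
  | cons c rest ih =>
    simp only [scanB]
    split
    · next h =>
      simp only [List.any_eq_true] at h
      obtain ⟨t, ht, hp⟩ := h
      exact iff_of_true rfl ⟨t, ht, (List.isPrefixOf_iff_prefix.mp hp).isInfix⟩
    · next h =>
      rw [ih]
      constructor
      · rintro ⟨t, ht, hinf⟩
        exact ⟨t, ht, hinf.trans (List.suffix_cons c rest).isInfix⟩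
      · rintro ⟨t, ht, hinf⟩
        rcases List.infix_cons_iff.mp hinf with hpre | hinf'
        · exact absurd (List.any_eq_true.mpr ⟨t, ht, List.isPrefixOf_iff_prefix.mpr hpre⟩) h
        · exact ⟨t, ht, hinf'⟩

lemma forbidden_eq : FORBIDDEN_TOKENS = tokensB := by decide

lemma any_eq_scan (u : String) :
    FORBIDDEN_TOKENS.any (fun token => PySem.Str.isIn token u) = scanB u.toList := by
  rw [forbidden_eq]
  by_cases h : ∃ t ∈ tokensB, t.toList <:+: u.toList
  · rw [(scanB_iff _).mpr h, List.any_eq_true]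
    obtain ⟨t, ht, hi⟩ := h
    exact ⟨t, ht, by rw [PySem.Str.isIn_eq]; exact (PySem.Chars.isIn_iff_infix _ _).mpr hi⟩
  · have hs : scanB u.toList = false := by
      rcases hh : scanB u.toList
      · rfl
      · exact absurd ((scanB_iff _).mp hh) h
    rw [hs, List.any_eq_false]
    intro t ht
    rw [PySem.Str.isIn_eq, PySem.Chars.isIn_iff_infix]
    exact fun hi => h ⟨t, ht, hi⟩

-- ===== VERDICT (by name: the statement is the Claim_ definition above) =====
theorem validate_body_spec : Claim_equal_validate_body := by
  intro body _
  unfold Spec_validate_body validate_body validate_body_alt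
  simp only [any_eq_scan]
  simp [Bool.and_assoc]
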